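-- pv_equiv track=rewrite | github.com/choi-yh/coding_test | Dynamic_Programming/BOJ_14501_퇴사.py | get_max_money
-- ===== SOURCE A (Python) =====
-- def get_max_money(n, schedules):
--     dp = [0] * (n+1)
--
--     for i in range(n-1, -1, -1):
--         if schedules[i][0] + i > n:
--             dp[i] = dp[i+1]
--         else:
--             dp[i] = max(dp[i+1], schedules[i][1] + dp[i + schedules[i][0]])
--
--     return dp[0]
-- ===== SOURCE B (Python) =====
-- def get_max_money(n, schedules):
--     # Forward DP: dp[i] = best earnings accumulated when day i starts;
--     # carry the value forward and relax the job starting on day i.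
--     dp = [0] * (n + 1)
--     for i in range(n):
--         dp[i + 1] = max(dp[i + 1], dp[i])
--         t, p = schedules[i]
--         if i + t <= n:
--             dp[i + t] = max(dp[i + t], dp[i] + p)
--     return dp[n]
-- ===== Notes on version B (the rewrite author's own statement) =====
-- stated objective: alternative
-- what changed: Replaces A's right-to-left suffix DP (dp[i] = best earnings still obtainable from day i on, filled by a countdown loop) with a left-to-right forward DP (dp[i] = best earnings accumulated when day i starts, carrying values forward and relaxing each job's end day); Pre_ restricts to the task's natural domain (0 <= n <= len(schedules), first n durations >= 1), outside which A raises IndexError or returns values read through negative-index wraparound, which the forward relaxation has no analogue of.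
-- outside the precondition, e.g. on get_max_money(1, [(0, 5)]): A returns 5, B returns 0
import Mathlib
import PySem

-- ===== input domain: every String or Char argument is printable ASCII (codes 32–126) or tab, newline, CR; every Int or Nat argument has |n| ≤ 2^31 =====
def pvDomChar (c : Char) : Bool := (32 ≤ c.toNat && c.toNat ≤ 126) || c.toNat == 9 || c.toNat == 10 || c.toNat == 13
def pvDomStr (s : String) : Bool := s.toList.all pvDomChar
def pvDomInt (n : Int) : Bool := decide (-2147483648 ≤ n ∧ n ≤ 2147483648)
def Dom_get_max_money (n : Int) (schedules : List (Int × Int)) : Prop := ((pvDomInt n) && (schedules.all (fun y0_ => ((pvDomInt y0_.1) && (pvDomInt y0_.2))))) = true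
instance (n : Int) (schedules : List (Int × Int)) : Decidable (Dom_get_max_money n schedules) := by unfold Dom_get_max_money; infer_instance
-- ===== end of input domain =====

-- B replaces A's right-to-left suffix DP (dp[i] = best earnings still obtainable from day i)
-- by a left-to-right forward DP (dp[i] = best earnings accumulated when day i starts, relaxing
-- each job's end day); alternative decomposition, similar cost; equivalence proved on Pre_.


-- ===== PORT A =====
def get_max_money (n : Int) (schedules : List (Int × Int)) : Int :=
  let dp : List Int := List.replicate (n + 1).toNat 0
  let dp := (PySem.List.pyRange (n - 1) (-1) (-1)).foldl (fun dp i =>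
    if (PySem.List.pyGetD schedules i ((0 : Int), (0 : Int))).1 + i > n then
      PySem.List.pySetD dp i (PySem.List.pyGetD dp (i + 1) 0)
    else
      PySem.List.pySetD dp i
        (max (PySem.List.pyGetD dp (i + 1) 0)
          ((PySem.List.pyGetD schedules i ((0 : Int), (0 : Int))).2 +
            PySem.List.pyGetD dp (i + (PySem.List.pyGetD schedules i ((0 : Int), (0 : Int))).1) 0))) dp
  PySem.List.pyGetD dp 0 0

-- ===== PORT B =====
def get_max_money_alt (n : Int) (schedules : List (Int × Int)) : Int :=
  let dp : List Int := List.replicate (n + 1).toNat 0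
  let dp := (PySem.List.pyRange 0 n 1).foldl (fun dp i =>
    let dp := PySem.List.pySetD dp (i + 1)
      (max (PySem.List.pyGetD dp (i + 1) 0) (PySem.List.pyGetD dp i 0))
    let tp := PySem.List.pyGetD schedules i ((0 : Int), (0 : Int))
    if i + tp.1 ≤ n then
      PySem.List.pySetD dp (i + tp.1)
        (max (PySem.List.pyGetD dp (i + tp.1) 0) (PySem.List.pyGetD dp i 0 + tp.2))
    else dp) dp
  PySem.List.pyGetD dp n 0

-- ===== PRECONDITION & SPEC =====
-- Pre_ is the task's natural domain (BOJ 14501: 1 ≤ T_i): 0 ≤ n ≤ len(schedules) and the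
-- first n durations are ≥ 1. Outside it A raises IndexError (n < 0, n > len, or a duration
-- ≤ -(n+2) on some day) or returns a value read through Python negative indexing / a dp cell
-- the countdown loop has not written yet.
def Pre_get_max_money (n : Int) (schedules : List (Int × Int)) : Prop :=
  0 ≤ n ∧ n ≤ (schedules.length : Int) ∧ ∀ x ∈ schedules.take n.toNat, 1 ≤ x.1
instance (n : Int) (schedules : List (Int × Int)) : Decidable (Pre_get_max_money n schedules) := by unfold Pre_get_max_money; infer_instance
def pvWitness_get_max_money : Int × (List (Int × Int)) := (2, [(1, 3), (2, 1)])

def Spec_get_max_money (n : Int) (schedules : List (Int × Int)) (out : Int) : Prop := out = get_max_money_alt n schedules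
instance (n : Int) (schedules : List (Int × Int)) (out : Int) : Decidable (Spec_get_max_money n schedules out) := by unfold Spec_get_max_money; infer_instance

-- ===== CLAIM (what is proved, stated in full; the proofs are below) =====
def Claim_equal_get_max_money : Prop := ∀ (n : Int) (schedules : List (Int × Int)), Dom_get_max_money n schedules → Pre_get_max_money n schedules → Spec_get_max_money n schedules (get_max_money n schedules)

-- ===== LEMMAS AND PROOFS =====

-- the common functional specification: best earnings obtainable from day i on
def pvBest (s : List (Int × Int)) (N : Nat) (i : Nat) : Int :=
  if h : i < N then
    if ht : 1 ≤ (s.getD i (0, 0)).1 ∧ (i : Int) + (s.getD i (0, 0)).1 ≤ (N : Int) then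
      max (pvBest s N (i + 1)) ((s.getD i (0, 0)).2 + pvBest s N (i + (s.getD i (0, 0)).1.toNat))
    else pvBest s N (i + 1)
  else 0
termination_by N - i
decreasing_by all_goals omega

theorem pvBest_stop (s : List (Int × Int)) (N i : Nat) (h : ¬ i < N) : pvBest s N i = 0 := by
  rw [pvBest, dif_neg h]

theorem pvBest_take (s : List (Int × Int)) (N i : Nat) (h : i < N)
    (h1 : 1 ≤ (s.getD i (0, 0)).1) (h2 : (i : Int) + (s.getD i (0, 0)).1 ≤ (N : Int)) :
    pvBest s N i = max (pvBest s N (i + 1)) ((s.getD i (0, 0)).2 + pvBest s N (i + (s.getD i (0, 0)).1.toNat)) := by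
  rw [pvBest, dif_pos h, dif_pos ⟨h1, h2⟩]

theorem pvBest_skip (s : List (Int × Int)) (N i : Nat) (h : i < N)
    (h2 : ¬ ((i : Int) + (s.getD i (0, 0)).1 ≤ (N : Int))) :
    pvBest s N i = pvBest s N (i + 1) := by
  rw [pvBest, dif_pos h, dif_neg (by tauto)]

theorem pvBest_succ_le (s : List (Int × Int)) (N i : Nat) :
    pvBest s N (i + 1) ≤ pvBest s N i := by
  by_cases h : i < N
  · conv_rhs => rw [pvBest]
    rw [dif_pos h]
    split_ifs <;> simp
  · rw [pvBest_stop s N i h, pvBest_stop s N (i + 1) (by omega)]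

theorem pvBest_le_zero (s : List (Int × Int)) (N : Nat) : ∀ i, pvBest s N i ≤ pvBest s N 0 := by
  intro i
  induction i with
  | zero => exact le_rfl
  | succ i ih => exact le_trans (pvBest_succ_le s N i) ih

-- forward-DP table contents after k loop iterations, as a function of the cell index j
def pvF (s : List (Int × Int)) (n : Nat) : Nat → Nat → Int
  | 0, _ => 0
  | k+1, j =>
    if ((k : Int) + (s.getD k (0, 0)).1 ≤ (n : Int)) then
      if j = k + (s.getD k (0, 0)).1.toNat then
        max (if k + (s.getD k (0, 0)).1.toNat = k + 1
              then max (pvF s n k (k+1)) (pvF s n k k) else pvF s n k (k + (s.getD k (0, 0)).1.toNat))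
            ((if k = k + 1 then max (pvF s n k (k+1)) (pvF s n k k) else pvF s n k k) + (s.getD k (0, 0)).2)
      else (if j = k + 1 then max (pvF s n k (k+1)) (pvF s n k k) else pvF s n k j)
    else (if j = k + 1 then max (pvF s n k (k+1)) (pvF s n k k) else pvF s n k j)

-- carried-forward table, the intermediate state after the first update of iteration k
def pvC (s : List (Int × Int)) (n k j : Nat) : Int :=
  if j = k + 1 then max (pvF s n k (k+1)) (pvF s n k k) else pvF s n k j

theorem pvF_succ (s : List (Int × Int)) (n k j : Nat) :
    pvF s n (k+1) j =
      if ((k : Int) + (s.getD k (0, 0)).1 ≤ (n : Int)) then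
        if j = k + (s.getD k (0, 0)).1.toNat then
          max (pvC s n k (k + (s.getD k (0, 0)).1.toNat)) (pvC s n k k + (s.getD k (0, 0)).2)
        else pvC s n k j
      else pvC s n k j := rfl

theorem pvC_self (s : List (Int × Int)) (n k : Nat) : pvC s n k k = pvF s n k k := by
  rw [pvC, if_neg (by omega)]

theorem pvF_le_pvC (s : List (Int × Int)) (n k j : Nat) : pvF s n k j ≤ pvC s n k j := by
  rw [pvC]
  split_ifs with h
  · rw [h]; exact le_max_left _ _
  · exact le_rfl

theorem pvF_self_le_pvC_succ (s : List (Int × Int)) (n k : Nat) :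
    pvF s n k k ≤ pvC s n k (k + 1) := by
  rw [pvC, if_pos rfl]
  exact le_max_right _ _

theorem pvF_le_pvF_succ (s : List (Int × Int)) (n k j : Nat) (_hj : k + 1 ≤ j) :
    pvF s n k j ≤ pvF s n (k+1) j := by
  rw [pvF_succ]
  split_ifs with h1 h2
  · refine le_trans ?_ (le_max_left _ _)
    rw [h2]
    exact pvF_le_pvC s n k _
  · exact pvF_le_pvC s n k j
  · exact pvF_le_pvC s n k j

theorem pvF_self_le_succ (s : List (Int × Int)) (n k : Nat) :
    pvF s n k k ≤ pvF s n (k+1) (k+1) := by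
  rw [pvF_succ]
  split_ifs with h1 h2
  · refine le_trans ?_ (le_max_left _ _)
    rw [← h2]
    exact pvF_self_le_pvC_succ s n k
  · exact pvF_self_le_pvC_succ s n k
  · exact pvF_self_le_pvC_succ s n k

theorem pvF_relax_le_succ (s : List (Int × Int)) (n k : Nat)
    (hfit : (k : Int) + (s.getD k (0, 0)).1 ≤ (n : Int)) :
    pvF s n k k + (s.getD k (0, 0)).2 ≤ pvF s n (k+1) (k + (s.getD k (0, 0)).1.toNat) := by
  rw [pvF_succ, if_pos hfit, if_pos rfl, pvC_self]
  exact le_max_right _ _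

-- running maximum of f j + pvBest j over j in [k, N]
def pvMx (s : List (Int × Int)) (N : Nat) (f : Nat → Int) (k : Nat) : Int :=
  if h : k < N then max (f k + pvBest s N k) (pvMx s N f (k+1)) else f N + pvBest s N N
termination_by N - k
decreasing_by omega

theorem pvMx_stop (s : List (Int × Int)) (N : Nat) (f : Nat → Int) :
    pvMx s N f N = f N := by
  rw [pvMx, dif_neg (by omega), pvBest_stop s N N (by omega), add_zero]

theorem le_pvMx (s : List (Int × Int)) (N : Nat) (f : Nat → Int) :
    ∀ d k j, N - k ≤ d → k ≤ j → j ≤ N → f j + pvBest s N j ≤ pvMx s N f k := by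
  intro d
  induction d with
  | zero =>
    intro k j h1 h2 h3
    rw [show k = N from by omega, show j = N from by omega, pvMx_stop,
      pvBest_stop s N N (by omega), add_zero]
  | succ d ih =>
    intro k j h1 h2 h3
    by_cases hk : k < N
    · rw [pvMx, dif_pos hk]
      rcases eq_or_lt_of_le h2 with h | h
      · subst h; exact le_max_left _ _
      · exact le_trans (ih (k+1) j (by omega) (by omega) h3) (le_max_right _ _)
    · rw [show k = N from by omega, show j = N from by omega, pvMx_stop,
        pvBest_stop s N N (by omega), add_zero]

theorem pvMx_le (s : List (Int × Int)) (N : Nat) (f : Nat → Int) (c : Int) :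
    ∀ d k, N - k ≤ d → k ≤ N → (∀ j, k ≤ j → j ≤ N → f j + pvBest s N j ≤ c) →
      pvMx s N f k ≤ c := by
  intro d
  induction d with
  | zero =>
    intro k h1 h2 hb
    rw [show k = N from by omega, pvMx_stop]
    have := hb N (by omega) le_rfl
    rwa [pvBest_stop s N N (by omega), add_zero] at this
  | succ d ih =>
    intro k h1 h2 hb
    by_cases hk : k < N
    · rw [pvMx, dif_pos hk]
      exact max_le (hb k le_rfl (by omega))
        (ih (k+1) (by omega) (by omega) (fun j hj1 hj2 => hb j (by omega) hj2))
    · rw [show k = N from by omega, pvMx_stop]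
      have := hb N (by omega) le_rfl
      rwa [pvBest_stop s N N (by omega), add_zero] at this

theorem pvMx_base (s : List (Int × Int)) (N : Nat) :
    pvMx s N (pvF s N 0) 0 = pvBest s N 0 := by
  apply le_antisymm
  · apply pvMx_le s N _ _ N 0 (by omega) (by omega)
    intro j _ _
    show pvF s N 0 j + pvBest s N j ≤ pvBest s N 0
    simp only [pvF, zero_add]
    exact pvBest_le_zero s N j
  · have := le_pvMx s N (pvF s N 0) N 0 0 (by omega) le_rfl (by omega)
    simpa only [pvF, zero_add] using this

theorem pv_set_map_range (f : Nat → Int) (m j : Nat) (v : Int) (hj : j < m) :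
    ((List.range m).map f).set j v = (List.range m).map (fun k => if k = j then v else f k) := by
  apply List.ext_getElem (by simp)
  intro k h1 h2
  simp only [List.getElem_set, List.getElem_map, List.getElem_range]
  by_cases hk : k = j
  · subst hk; simp
  · simp [hk, Ne.symm hk]

-- bound for the carried-forward intermediate table
theorem pvC_bound (s : List (Int × Int)) (N k j : Nat) (hk : k < N) (hj1 : k + 1 ≤ j) (hj2 : j ≤ N) :
    pvC s N k j + pvBest s N j ≤ pvMx s N (pvF s N k) k := by
  have hbk : pvF s N k k + pvBest s N k ≤ pvMx s N (pvF s N k) k :=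
    le_pvMx s N _ N k k (by omega) le_rfl (by omega)
  by_cases h1 : j = k + 1
  · subst h1
    rw [pvC, if_pos rfl, ← max_add_add_right]
    apply max_le
    · exact le_pvMx s N _ N k (k+1) (by omega) (by omega) hj2
    · have : pvF s N k k + pvBest s N (k+1) ≤ pvF s N k k + pvBest s N k :=
        add_le_add le_rfl (pvBest_succ_le s N k)
      omega
  · rw [pvC, if_neg h1]
    exact le_pvMx s N _ N k j (by omega) (by omega) hj2

-- the invariant step: one forward iteration preserves the running maximum
theorem pvMx_step (s : List (Int × Int)) (N k : Nat) (hk : k < N)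
    (ht1 : 1 ≤ (s.getD k (0, 0)).1) :
    pvMx s N (pvF s N (k+1)) (k+1) = pvMx s N (pvF s N k) k := by
  set t := (s.getD k (0, 0)).1 with htdef
  set p := (s.getD k (0, 0)).2 with hpdef
  apply le_antisymm
  · apply pvMx_le s N _ _ N (k+1) (by omega) (by omega)
    intro j hj1 hj2
    have hbk : pvF s N k k + pvBest s N k ≤ pvMx s N (pvF s N k) k :=
      le_pvMx s N _ N k k (by omega) le_rfl (by omega)
    rw [pvF_succ, ← htdef, ← hpdef]
    by_cases hfit : (k : Int) + t ≤ (N : Int)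
    · rw [if_pos hfit]
      by_cases hjt : j = k + t.toNat
      · rw [if_pos hjt, pvC_self, ← max_add_add_right]
        apply max_le
        · rw [← hjt]
          exact pvC_bound s N k j hk hj1 hj2
        · have hrel : p + pvBest s N (k + t.toNat) ≤ pvBest s N k := by
            rw [pvBest_take s N k hk (htdef ▸ ht1) (htdef ▸ hfit), ← htdef, ← hpdef]
            exact le_max_right _ _
          have : pvF s N k k + (p + pvBest s N (k + t.toNat)) ≤ pvF s N k k + pvBest s N k :=
            add_le_add le_rfl hrel
          rw [hjt]
          omega
      · rw [if_neg hjt]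
        exact pvC_bound s N k j hk hj1 hj2
    · rw [if_neg hfit]
      exact pvC_bound s N k j hk hj1 hj2
  · apply pvMx_le s N _ _ N k (by omega) (by omega)
    intro j hj1 hj2
    rcases eq_or_lt_of_le hj1 with h | h
    · rw [← h]
      have e3 : pvF s N k k + pvBest s N (k+1) ≤ pvMx s N (pvF s N (k+1)) (k+1) :=
        le_trans (add_le_add (pvF_self_le_succ s N k) le_rfl)
          (le_pvMx s N _ N (k+1) (k+1) (by omega) le_rfl (by omega))
      by_cases hfit : (k : Int) + t ≤ (N : Int)
      · rw [pvBest_take s N k hk (htdef ▸ ht1) (htdef ▸ hfit), ← htdef, ← hpdef,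
          ← max_add_add_left]
        apply max_le
        · exact e3
        · have e4 : (pvF s N k k + p) + pvBest s N (k + t.toNat)
              ≤ pvMx s N (pvF s N (k+1)) (k+1) :=
            le_trans (add_le_add (by
                have := pvF_relax_le_succ s N k (by rw [← htdef]; exact hfit)
                rw [← htdef, ← hpdef] at this
                exact this) le_rfl)
              (le_pvMx s N _ N (k+1) (k + t.toNat) (by omega) (by omega) (by omega))
          omega
      · rw [pvBest_skip s N k hk (by rw [← htdef]; exact hfit)]
        exact e3
    · exact le_trans (add_le_add (pvF_le_pvF_succ s N k j (by omega)) le_rfl)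
        (le_pvMx s N _ N (k+1) j (by omega) (by omega) hj2)

-- the forward loop invariant, iterated
theorem pvInv (s : List (Int × Int)) (N : Nat) (hlen : N ≤ s.length)
    (hdur : ∀ x ∈ s.take N, 1 ≤ x.1) :
    ∀ k, k ≤ N → pvMx s N (pvF s N k) k = pvBest s N 0 := by
  intro k
  induction k with
  | zero => intro _; exact pvMx_base s N
  | succ k ih =>
    intro h
    have hkN : k < N := h
    have hisl : k < s.length := lt_of_lt_of_le hkN hlen
    have hmem : s.getD k (0, 0) ∈ s.take N := by
      rw [List.getD_eq_getElem s (0, 0) hisl]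
      have hlt : k < (s.take N).length := by simp; omega
      have hm := List.getElem_mem hlt
      rwa [List.getElem_take] at hm
    rw [pvMx_step s N k hkN (hdur _ hmem)]
    exact ih (le_of_lt hkN)

theorem pvF_final (s : List (Int × Int)) (N : Nat) (hlen : N ≤ s.length)
    (hdur : ∀ x ∈ s.take N, 1 ≤ x.1) :
    pvF s N N N = pvBest s N 0 := by
  have := pvInv s N hlen hdur N le_rfl
  rwa [pvMx_stop] at this

-- one iteration of B's forward loop, on the table in map-over-range form
theorem pvB_step (s : List (Int × Int)) (N k : Nat) (hk : k < N)
    (ht1 : 1 ≤ (s.getD k (0, 0)).1) :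
    (if (k : Int) + (PySem.List.pyGetD s (k : Int) ((0 : Int), (0 : Int))).1 ≤ (N : Int) then
       PySem.List.pySetD
         (PySem.List.pySetD ((List.range (N + 1)).map (pvF s N k)) ((k : Int) + 1)
           (max (PySem.List.pyGetD ((List.range (N + 1)).map (pvF s N k)) ((k : Int) + 1) 0)
                (PySem.List.pyGetD ((List.range (N + 1)).map (pvF s N k)) (k : Int) 0)))
         ((k : Int) + (PySem.List.pyGetD s (k : Int) ((0 : Int), (0 : Int))).1)
         (max (PySem.List.pyGetD
                 (PySem.List.pySetD ((List.range (N + 1)).map (pvF s N k)) ((k : Int) + 1)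
                   (max (PySem.List.pyGetD ((List.range (N + 1)).map (pvF s N k)) ((k : Int) + 1) 0)
                        (PySem.List.pyGetD ((List.range (N + 1)).map (pvF s N k)) (k : Int) 0)))
                 ((k : Int) + (PySem.List.pyGetD s (k : Int) ((0 : Int), (0 : Int))).1) 0)
              (PySem.List.pyGetD
                 (PySem.List.pySetD ((List.range (N + 1)).map (pvF s N k)) ((k : Int) + 1)
                   (max (PySem.List.pyGetD ((List.range (N + 1)).map (pvF s N k)) ((k : Int) + 1) 0)
                        (PySem.List.pyGetD ((List.range (N + 1)).map (pvF s N k)) (k : Int) 0)))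
                 (k : Int) 0 + (PySem.List.pyGetD s (k : Int) ((0 : Int), (0 : Int))).2))
     else
       PySem.List.pySetD ((List.range (N + 1)).map (pvF s N k)) ((k : Int) + 1)
         (max (PySem.List.pyGetD ((List.range (N + 1)).map (pvF s N k)) ((k : Int) + 1) 0)
              (PySem.List.pyGetD ((List.range (N + 1)).map (pvF s N k)) (k : Int) 0)))
    = (List.range (N + 1)).map (pvF s N (k+1)) := by
  rw [PySem.List.pyGetD_natCast s]
  set t := (s.getD k (0, 0)).1 with htdef
  set p := (s.getD k (0, 0)).2 with hpdef
  have hr1 : PySem.List.pyGetD ((List.range (N + 1)).map (pvF s N k)) ((k : Int) + 1) 0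
      = pvF s N k (k+1) := by
    rw [show ((k : Int) + 1) = ((k + 1 : Nat) : Int) from by omega, PySem.List.pyGetD_natCast,
      PySem.List.getD_map_range _ _ _ _ (by omega)]
  have hr0 : PySem.List.pyGetD ((List.range (N + 1)).map (pvF s N k)) (k : Int) 0
      = pvF s N k k := by
    rw [PySem.List.pyGetD_natCast, PySem.List.getD_map_range _ _ _ _ (by omega)]
  rw [hr1, hr0]
  have hset1 : PySem.List.pySetD ((List.range (N + 1)).map (pvF s N k)) ((k : Int) + 1)
      (max (pvF s N k (k+1)) (pvF s N k k)) = (List.range (N + 1)).map (pvC s N k) := by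
    rw [show ((k : Int) + 1) = ((k + 1 : Nat) : Int) from by omega, PySem.List.pySetD_natCast,
      pv_set_map_range _ _ _ _ (by omega)]
    apply List.map_congr_left
    intro j _
    rw [pvC]
  rw [hset1]
  by_cases hfit : (k : Int) + t ≤ (N : Int)
  · rw [if_pos hfit]
    have hcast : (k : Int) + t = ((k + t.toNat : Nat) : Int) := by omega
    have hrt : PySem.List.pyGetD ((List.range (N + 1)).map (pvC s N k)) ((k : Int) + t) 0
        = pvC s N k (k + t.toNat) := by
      rw [hcast, PySem.List.pyGetD_natCast, PySem.List.getD_map_range _ _ _ _ (by omega)]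
    have hrk : PySem.List.pyGetD ((List.range (N + 1)).map (pvC s N k)) (k : Int) 0
        = pvC s N k k := by
      rw [PySem.List.pyGetD_natCast, PySem.List.getD_map_range _ _ _ _ (by omega)]
    rw [hrt, hrk, hcast, PySem.List.pySetD_natCast, pv_set_map_range _ _ _ _ (by omega)]
    apply List.map_congr_left
    intro j _
    rw [pvF_succ, ← htdef, ← hpdef, if_pos hfit, pvC_self]
  · rw [if_neg hfit]
    apply List.map_congr_left
    intro j _
    rw [pvF_succ, ← htdef, if_neg hfit]

-- B's forward loop, iterated
theorem pvB_loop (s : List (Int × Int)) (N : Nat) (hlen : N ≤ s.length)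
    (hdur : ∀ x ∈ s.take N, 1 ≤ x.1) :
    ∀ d k, k + d = N →
      (PySem.List.pyRange (k : Int) (N : Int) 1).foldl
        (fun dp i =>
          if i + (PySem.List.pyGetD s i ((0 : Int), (0 : Int))).1 ≤ (N : Int) then
            PySem.List.pySetD
              (PySem.List.pySetD dp (i + 1)
                (max (PySem.List.pyGetD dp (i + 1) 0) (PySem.List.pyGetD dp i 0)))
              (i + (PySem.List.pyGetD s i ((0 : Int), (0 : Int))).1)
              (max (PySem.List.pyGetD
                      (PySem.List.pySetD dp (i + 1)
                        (max (PySem.List.pyGetD dp (i + 1) 0) (PySem.List.pyGetD dp i 0)))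
                      (i + (PySem.List.pyGetD s i ((0 : Int), (0 : Int))).1) 0)
                   (PySem.List.pyGetD
                      (PySem.List.pySetD dp (i + 1)
                        (max (PySem.List.pyGetD dp (i + 1) 0) (PySem.List.pyGetD dp i 0)))
                      i 0 + (PySem.List.pyGetD s i ((0 : Int), (0 : Int))).2))
          else
            PySem.List.pySetD dp (i + 1)
              (max (PySem.List.pyGetD dp (i + 1) 0) (PySem.List.pyGetD dp i 0)))
        ((List.range (N + 1)).map (pvF s N k))
      = (List.range (N + 1)).map (pvF s N N) := by
  intro d
  induction d with
  | zero =>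
    intro k hkd
    have hk : k = N := by omega
    subst hk
    rw [PySem.List.pyRange_one_eq_nil (by omega)]
    rfl
  | succ d ih =>
    intro k hkd
    have hkN : k < N := by omega
    have hisl : k < s.length := lt_of_lt_of_le hkN hlen
    have hmem : s.getD k (0, 0) ∈ s.take N := by
      rw [List.getD_eq_getElem s (0, 0) hisl]
      have hlt : k < (s.take N).length := by simp; omega
      have hm := List.getElem_mem hlt
      rwa [List.getElem_take] at hm
    rw [PySem.List.pyRange_one_cons (by exact_mod_cast hkN)]
    simp only [List.foldl_cons]
    rw [pvB_step s N k hkN (hdur _ hmem),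
      show ((k : Int) + 1) = ((k + 1 : Nat) : Int) from by omega]
    exact ih (k + 1) (by omega)

theorem get_max_money_alt_eq_pvBest (n : Int) (s : List (Int × Int))
    (h0 : 0 ≤ n) (hlen : n ≤ (s.length : Int))
    (hdur : ∀ x ∈ s.take n.toNat, 1 ≤ x.1) :
    get_max_money_alt n s = pvBest s n.toNat 0 := by
  obtain ⟨N, rfl⟩ : ∃ N : Nat, n = (N : Int) := ⟨n.toNat, by omega⟩
  rw [Int.toNat_natCast] at hdur ⊢
  have hN : N ≤ s.length := by omega
  simp only [get_max_money_alt]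
  rw [show ((N : Int) + 1).toNat = N + 1 from by omega]
  have hrep : List.replicate (N + 1) (0 : Int) = (List.range (N + 1)).map (pvF s N 0) := by
    symm
    rw [List.eq_replicate_iff]
    constructor
    · simp
    · intro b hb
      obtain ⟨j, _, rfl⟩ := List.mem_map.mp hb
      rfl
  rw [hrep]
  have hl := pvB_loop s N hN hdur N 0 (by omega)
  rw [Nat.cast_zero] at hl
  rw [hl, PySem.List.pyGetD_natCast, PySem.List.getD_map_range _ _ _ _ (by omega)]
  exact pvF_final s N hN hdur

theorem pvA_step (s : List (Int × Int)) (N i : Nat) (st : List Int)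
    (hst : st = (List.range (N + 1)).map (fun j => if i + 1 ≤ j then pvBest s N j else 0))
    (hiN : i < N)
    (ht1 : 1 ≤ (s.getD i (0, 0)).1) :
    (if (PySem.List.pyGetD s (i : Int) ((0 : Int), (0 : Int))).1 + (i : Int) > (N : Int) then
       PySem.List.pySetD st (i : Int) (PySem.List.pyGetD st ((i : Int) + 1) 0)
     else
       PySem.List.pySetD st (i : Int)
         (max (PySem.List.pyGetD st ((i : Int) + 1) 0)
           ((PySem.List.pyGetD s (i : Int) ((0 : Int), (0 : Int))).2 +
             PySem.List.pyGetD st ((i : Int) + (PySem.List.pyGetD s (i : Int) ((0 : Int), (0 : Int))).1) 0)))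
    = (List.range (N + 1)).map (fun j => if i ≤ j then pvBest s N j else 0) := by
  subst hst
  rw [PySem.List.pyGetD_natCast]
  set t := (s.getD i (0, 0)).1 with htdef
  set p := (s.getD i (0, 0)).2 with hpdef
  have hread1 : PySem.List.pyGetD
      ((List.range (N + 1)).map (fun j => if i + 1 ≤ j then pvBest s N j else 0)) ((i : Int) + 1) 0
      = pvBest s N (i + 1) := by
    rw [show ((i : Int) + 1) = ((i + 1 : Nat) : Int) from by omega, PySem.List.pyGetD_natCast,
      PySem.List.getD_map_range _ _ _ _ (by omega)]
    simp
  by_cases hgt : t + (i : Int) > (N : Int)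
  · rw [if_pos hgt, hread1, PySem.List.pySetD_natCast, pv_set_map_range _ _ _ _ (by omega)]
    apply List.map_congr_left
    intro k hk
    have hkr : k < N + 1 := List.mem_range.mp hk
    have hskip : pvBest s N i = pvBest s N (i + 1) := pvBest_skip s N i hiN (by omega)
    by_cases hki : k = i
    · subst hki; simp [hskip]
    · have : (i + 1 ≤ k) ↔ (i ≤ k) := by omega
      split_ifs with h1 h2 h3 <;> simp_all
  · rw [if_neg hgt, hread1]
    have hcast : (i : Int) + t = ((i + t.toNat : Nat) : Int) := by omega
    have hread2 : PySem.List.pyGetD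
        ((List.range (N + 1)).map (fun j => if i + 1 ≤ j then pvBest s N j else 0)) ((i : Int) + t) 0
        = pvBest s N (i + t.toNat) := by
      rw [hcast, PySem.List.pyGetD_natCast, PySem.List.getD_map_range _ _ _ _ (by omega)]
      rw [if_pos (by omega)]
    rw [hread2, PySem.List.pySetD_natCast, pv_set_map_range _ _ _ _ (by omega)]
    have hval : max (pvBest s N (i + 1)) (p + pvBest s N (i + t.toNat)) = pvBest s N i := by
      rw [pvBest_take s N i hiN ht1 (by omega)]
    rw [hval]
    apply List.map_congr_left
    intro k hk
    have hkr : k < N + 1 := List.mem_range.mp hk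
    by_cases hki : k = i
    · subst hki; simp
    · have : (i + 1 ≤ k) ↔ (i ≤ k) := by omega
      split_ifs with h1 h2 h3 <;> simp_all

theorem pvA_loop (s : List (Int × Int)) (N : Nat) (hlen : N ≤ s.length)
    (hdur : ∀ x ∈ s.take N, 1 ≤ x.1) :
    ∀ i, i ≤ N →
      (PySem.List.pyRange ((i : Int) - 1) (-1) (-1)).foldl
        (fun dp k =>
          if (PySem.List.pyGetD s k ((0 : Int), (0 : Int))).1 + k > (N : Int) then
            PySem.List.pySetD dp k (PySem.List.pyGetD dp (k + 1) 0)
          else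
            PySem.List.pySetD dp k
              (max (PySem.List.pyGetD dp (k + 1) 0)
                ((PySem.List.pyGetD s k ((0 : Int), (0 : Int))).2 +
                  PySem.List.pyGetD dp (k + (PySem.List.pyGetD s k ((0 : Int), (0 : Int))).1) 0)))
        ((List.range (N + 1)).map (fun j => if i ≤ j then pvBest s N j else 0))
      = (List.range (N + 1)).map (fun j => pvBest s N j) := by
  intro i
  induction i with
  | zero =>
    intro _
    rw [PySem.List.pyRange_neg_one_eq_nil (by omega)]
    simp
  | succ i ih =>
    intro h
    have hiN : i < N := h
    have hisl : i < s.length := lt_of_lt_of_le hiN hlen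
    have hmem : s.getD i (0, 0) ∈ s.take N := by
      rw [List.getD_eq_getElem s (0, 0) hisl]
      have hlt : i < (s.take N).length := by simp; omega
      have hm := List.getElem_mem hlt
      rwa [List.getElem_take] at hm
    rw [show ((i + 1 : Nat) : Int) - 1 = (i : Int) from by push_cast; ring,
      PySem.List.pyRange_neg_one_cons (by omega), List.foldl_cons,
      pvA_step s N i _ rfl hiN (hdur _ hmem)]
    exact ih (le_of_lt hiN)

theorem get_max_money_eq_pvBest (n : Int) (s : List (Int × Int))
    (h0 : 0 ≤ n) (hlen : n ≤ (s.length : Int))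
    (hdur : ∀ x ∈ s.take n.toNat, 1 ≤ x.1) :
    get_max_money n s = pvBest s n.toNat 0 := by
  obtain ⟨N, rfl⟩ : ∃ N : Nat, n = (N : Int) := ⟨n.toNat, by omega⟩
  rw [Int.toNat_natCast] at hdur ⊢
  have hN : N ≤ s.length := by omega
  simp only [get_max_money]
  rw [show ((N : Int) + 1).toNat = N + 1 from by omega]
  have hrep : List.replicate (N + 1) (0 : Int)
      = (List.range (N + 1)).map (fun j => if N ≤ j then pvBest s N j else 0) := by
    symm
    rw [List.eq_replicate_iff]
    constructor
    · simp
    · intro b hb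
      obtain ⟨j, hj, rfl⟩ := List.mem_map.mp hb
      have hjr : j < N + 1 := List.mem_range.mp hj
      by_cases hje : N ≤ j
      · rw [if_pos hje, pvBest_stop s N j (by omega)]
      · rw [if_neg hje]
  rw [hrep, pvA_loop s N hN hdur N le_rfl, PySem.List.pyGetD_zero,
    PySem.List.getD_map_range _ _ _ _ (by omega)]

-- ===== VERDICT (by name: the statement is the Claim_ definition above) =====
theorem get_max_money_spec : Claim_equal_get_max_money := by
  intro n s _ hpre
  unfold Spec_get_max_money
  obtain ⟨h0, hlen, hdur⟩ := hpre
  rw [get_max_money_eq_pvBest n s h0 hlen hdur, get_max_money_alt_eq_pvBest n s h0 hlen hdur]
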